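-- pv_equiv track=rewrite | github.com/saleor/saleor | tutorial-env/lib/python3.6/site-packages/graphql/utils/quoted_or_list.py | quoted_or_list
-- ===== SOURCE A (Python) =====
-- import functools
--
-- MAX_LENGTH = 5
--
-- def quoted_or_list(items):
--     # type: (List[str]) -> str
--     """Given [ A, B, C ] return '"A", "B" or "C"'."""
--     selected = items[:MAX_LENGTH]
--     quoted_items = ('"{}"'.format(t) for t in selected)
--
--     def quoted_or_text(text, quoted_and_index):
--         index = quoted_and_index[0]
--         quoted_item = quoted_and_index[1]
--         text += (
--             (", " if len(selected) > 2 and not index == len(selected) - 1 else " ")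
--             + ("or " if index == len(selected) - 1 else "")
--             + quoted_item
--         )
--         return text
--
--     enumerated_items = enumerate(quoted_items)
--     first_item = next(enumerated_items)[1]
--     return functools.reduce(quoted_or_text, enumerated_items, first_item)
-- ===== SOURCE B (Python) =====
-- MAX_LENGTH = 5
--
-- def quoted_or_list(items):
--     """Given [ A, B, C ] return '"A", "B" or "C"'."""
--     quoted = ['"{}"'.format(t) for t in items[:MAX_LENGTH]]
--     if len(quoted) <= 1:
--         return quoted[0]
--     return ', '.join(quoted[:-1]) + ' or ' + quoted[-1]
-- ===== Notes on version B (the rewrite author's own statement) =====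
-- stated objective: idiomatic
-- what changed: Replaces the functools.reduce/enumerate left-fold with index comparisons by a direct join-based construction: comma-join all but the last quoted item and append ' or ' plus the last.
-- outside the precondition, e.g. on quoted_or_list([]): A raises StopIteration, B raises IndexError
import Mathlib
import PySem

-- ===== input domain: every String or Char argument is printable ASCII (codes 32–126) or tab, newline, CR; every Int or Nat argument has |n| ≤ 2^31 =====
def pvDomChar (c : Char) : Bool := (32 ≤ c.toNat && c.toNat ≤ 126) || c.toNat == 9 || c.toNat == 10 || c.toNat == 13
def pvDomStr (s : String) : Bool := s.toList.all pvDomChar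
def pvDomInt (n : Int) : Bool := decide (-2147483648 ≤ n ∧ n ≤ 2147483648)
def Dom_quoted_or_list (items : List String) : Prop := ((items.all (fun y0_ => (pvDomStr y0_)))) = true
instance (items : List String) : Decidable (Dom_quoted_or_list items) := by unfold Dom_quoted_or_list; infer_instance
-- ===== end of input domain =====

-- B replaces A's reduce/enumerate fold by a join-based construction (idiomatic); equivalence is about the
-- return value on non-empty input (on [] A raises StopIteration, B raises IndexError — excluded by Pre_).

-- ===== PORT A =====
-- the inner 'quoted_or_text' closure (captures len(selected))
def quoted_or_text (selLen : Int) (text : List Char) (qi : Int × List Char) : List Char :=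
  text ++ ((if selLen > 2 ∧ ¬ (qi.1 = selLen - 1) then (", ").toList else (" ").toList)
    ++ (if qi.1 = selLen - 1 then ("or ").toList else [])
    ++ qi.2)

def quoted_or_list (items : List String) : String :=
  let selected := PySem.List.slice items none (some 5)
  let quoted := selected.map (fun t => '"' :: (t.toList ++ ['"']))
  match PySem.List.enumerate quoted 0 with
  | [] => ""   -- next(enumerated_items) raises StopIteration here; excluded by Pre_
  | (_, first) :: rest =>
      String.ofList (rest.foldl (quoted_or_text (selected.length : Int)) first)

-- ===== PORT B =====
def quoted_or_list_alt (items : List String) : String :=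
  let quoted := (PySem.List.slice items none (some 5)).map (fun t => '"' :: (t.toList ++ ['"']))
  if quoted.length ≤ 1 then
    String.ofList (quoted.headD [])   -- quoted[0]; IndexError on [] is excluded by Pre_
  else
    String.ofList (PySem.Chars.join (", ").toList (PySem.List.slice quoted none (some (-1)))
      ++ (" or ").toList ++ PySem.List.pyGetD quoted (-1) [])

-- ===== PRECONDITION & SPEC =====
-- On [] both A and B raise (StopIteration / IndexError), so the empty list is excluded.
def Pre_quoted_or_list (items : List String) : Prop := items ≠ []
instance (items : List String) : Decidable (Pre_quoted_or_list items) := by unfold Pre_quoted_or_list; infer_instance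
def pvWitness_quoted_or_list : List String := (["A", "B", "C"])

def Spec_quoted_or_list (items : List String) (out : String) : Prop := out = quoted_or_list_alt items
instance (items : List String) (out : String) : Decidable (Spec_quoted_or_list items out) := by unfold Spec_quoted_or_list; infer_instance

-- ===== CLAIM (what is proved, stated in full; the proofs are below) =====
def Claim_equal_quoted_or_list : Prop := ∀ (items : List String), Dom_quoted_or_list items → Pre_quoted_or_list items → Spec_quoted_or_list items (quoted_or_list items)

-- ===== LEMMAS AND PROOFS =====

theorem quoted_or_list_eq (items : List String) (h : items ≠ []) :
    quoted_or_list items = quoted_or_list_alt items := by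
  match items with
  | [] => exact absurd rfl h
  | [a] =>
      simp only [quoted_or_list, quoted_or_list_alt]
      rw [PySem.List.slice_to _ (by norm_num), PySem.List.slice_to_neg_one]
      simp [PySem.List.enumerate, List.take_succ_cons]
  | [a, b] =>
      simp only [quoted_or_list, quoted_or_list_alt]
      rw [PySem.List.slice_to _ (by norm_num), PySem.List.slice_to_neg_one]
      simp [PySem.List.enumerate, quoted_or_text, PySem.Chars.join, List.intercalate,
        PySem.List.pyGetD, PySem.List.pyGet?_neg_one, List.take_succ_cons]
  | [a, b, c] =>
      simp only [quoted_or_list, quoted_or_list_alt]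
      rw [PySem.List.slice_to _ (by norm_num), PySem.List.slice_to_neg_one]
      simp [PySem.List.enumerate, quoted_or_text, PySem.Chars.join, List.intercalate,
        PySem.List.pyGetD, PySem.List.pyGet?_neg_one, List.take_succ_cons]
  | [a, b, c, d] =>
      simp only [quoted_or_list, quoted_or_list_alt]
      rw [PySem.List.slice_to _ (by norm_num), PySem.List.slice_to_neg_one]
      simp [PySem.List.enumerate, quoted_or_text, PySem.Chars.join, List.intercalate,
        PySem.List.pyGetD, PySem.List.pyGet?_neg_one, List.take_succ_cons]
  | a :: b :: c :: d :: e :: rest =>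
      simp only [quoted_or_list, quoted_or_list_alt]
      rw [PySem.List.slice_to _ (by norm_num), PySem.List.slice_to_neg_one]
      simp [PySem.List.enumerate, quoted_or_text, PySem.Chars.join, List.intercalate,
        PySem.List.pyGetD, PySem.List.pyGet?_neg_one, List.take_succ_cons]

-- ===== VERDICT (by name: the statement is the Claim_ definition above) =====
theorem quoted_or_list_spec : Claim_equal_quoted_or_list := by
  intro items _ hpre
  exact quoted_or_list_eq items hpre
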